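-- pv_equiv track=rewrite | github.com/daniel-mf-92/holyc-inference | bench/qemu_serial_endpoint_audit.py | has_serial_stdio
-- ===== SOURCE A (Python) =====
-- STDIO_SERIAL_VALUES = {"stdio", "mon:stdio"}
--
-- def option_value(command: list[str], index: int) -> str:
--     arg = command[index]
--     if "=" in arg:
--         return arg.split("=", 1)[1]
--     if index + 1 < len(command):
--         return command[index + 1]
--     return ""
--
-- def has_serial_stdio(command: list[str]) -> bool:
--     if "-nographic" in command:
--         return True
--     for index, arg in enumerate(command):
--         if arg == "-serial" or arg.startswith("-serial="):
--             if option_value(command, index).lower() in STDIO_SERIAL_VALUES: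
--                 return True
--     return False
-- ===== SOURCE B (Python) =====
-- STDIO_SERIAL_VALUES = {"stdio", "mon:stdio"}
--
-- def has_serial_stdio(command: list[str]) -> bool:
--     pending = False
--     for token in command:
--         if pending:
--             pending = False
--             if token.lower() in STDIO_SERIAL_VALUES:
--                 return True
--         if token == "-nographic":
--             return True
--         if token.startswith("-serial="):
--             if token.split("=", 1)[1].lower() in STDIO_SERIAL_VALUES:
--                 return True
--         elif token == "-serial":
--             pending = True
--     return False
-- ===== Notes on version B (the rewrite author's own statement) =====
-- stated objective: simpler
-- what changed: Single forward pass carrying a 'pending' flag for a preceding bare -serial, instead of an up-front membership scan plus an enumerate loop with an index-based lookahead helper.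
import Mathlib
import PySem

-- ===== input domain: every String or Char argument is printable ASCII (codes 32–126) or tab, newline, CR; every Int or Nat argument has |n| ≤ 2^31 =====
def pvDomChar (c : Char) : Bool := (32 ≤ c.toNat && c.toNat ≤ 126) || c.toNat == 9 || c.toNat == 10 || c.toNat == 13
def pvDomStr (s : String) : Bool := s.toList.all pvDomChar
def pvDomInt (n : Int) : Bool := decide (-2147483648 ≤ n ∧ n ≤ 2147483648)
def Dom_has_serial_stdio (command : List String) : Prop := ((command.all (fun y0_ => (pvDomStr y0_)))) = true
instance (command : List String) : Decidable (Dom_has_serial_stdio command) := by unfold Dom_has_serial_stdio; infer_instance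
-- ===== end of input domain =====

-- B replaces A's up-front membership scan + enumerate loop with index-lookahead helper by a single forward pass carrying a 'pending' flag; objective: simpler.


-- ===== PORT A =====
-- STDIO_SERIAL_VALUES = {"stdio", "mon:stdio"}  (module constant shared by both Pythons)
def STDIO_SERIAL_VALUES : PySem.Set String := PySem.Set.ofList ["stdio", "mon:stdio"]

-- option_value(command, index); at every call site index is a valid index of command,
-- so reading command[index] with pyGetD is exact there.
def option_value (command : List String) (index : Int) : String :=
  let arg := PySem.List.pyGetD command index ""
  if PySem.Str.isIn "=" arg then
    PySem.List.pyGetD ((PySem.Str.splitMax? arg "=" 1).getD []) 1 ""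
  else if index + 1 < (command.length : Int) then
    PySem.List.pyGetD command (index + 1) ""
  else ""

def has_serial_stdio (command : List String) : Bool :=
  if command.contains "-nographic" then true
  else
    (PySem.List.enumerate command 0).foldl
      (fun acc p =>
        acc || ((p.2 == "-serial" || PySem.Str.startswith p.2 "-serial=") &&
                PySem.Set.contains STDIO_SERIAL_VALUES
                  (PySem.Str.lower (option_value command p.1))))
      false

-- ===== PORT B =====
-- one forward pass; 'pending' = previous token was a bare "-serial"
def pvScan (toks : List String) (pending : Bool) : Bool :=
  match toks with
  | [] => false
  | token :: rest =>
    if pending && PySem.Set.contains STDIO_SERIAL_VALUES (PySem.Str.lower token) then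
      true
    else if token == "-nographic" then
      true
    else if PySem.Str.startswith token "-serial=" then
      if PySem.Set.contains STDIO_SERIAL_VALUES
          (PySem.Str.lower
            (PySem.List.pyGetD ((PySem.Str.splitMax? token "=" 1).getD []) 1 "")) then
        true
      else pvScan rest false
    else
      pvScan rest (token == "-serial")

def has_serial_stdio_alt (command : List String) : Bool :=
  pvScan command false

-- ===== PRECONDITION & SPEC =====
def Spec_has_serial_stdio (command : List String) (out : Bool) : Prop := out = has_serial_stdio_alt command
instance (command : List String) (out : Bool) : Decidable (Spec_has_serial_stdio command out) := by unfold Spec_has_serial_stdio; infer_instance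

-- ===== CLAIM (what is proved, stated in full; the proofs are below) =====
def Claim_equal_has_serial_stdio : Prop := ∀ (command : List String), Dom_has_serial_stdio command → Spec_has_serial_stdio command (has_serial_stdio command)

-- ===== LEMMAS AND PROOFS =====

-- value of token.split("=",1)[1]
def pvVal (t : String) : String :=
  PySem.List.pyGetD ((PySem.Str.splitMax? t "=" 1).getD []) 1 ""

-- A's option_value, expressed structurally on the suffix: token t followed by rest
def pvOv (t : String) (rest : List String) : String :=
  if PySem.Str.isIn "=" t then pvVal t else rest.headD ""

def pvInSet (s : String) : Bool :=
  PySem.Set.contains STDIO_SERIAL_VALUES (PySem.Str.lower s)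

-- reference: does some "-serial"/"-serial=" token of the suffix carry an stdio value?
def pvAux : List String → Bool
  | [] => false
  | t :: rest =>
    ((t == "-serial" || PySem.Str.startswith t "-serial=") && pvInSet (pvOv t rest)) || pvAux rest

theorem pvGetD_mid (pre : List String) (t : String) (rest : List String) :
    PySem.List.pyGetD (pre ++ t :: rest) (pre.length : Int) "" = t := by
  rw [PySem.List.pyGetD_natCast]
  simp

theorem pvGetD_mid_succ (pre : List String) (t : String) (rest : List String) :
    PySem.List.pyGetD (pre ++ t :: rest) ((pre.length : Int) + 1) "" = rest.headD "" := by
  have h1 : ((pre.length : Int) + 1) = ((pre.length + 1 : Nat) : Int) := by push_cast; ring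
  rw [h1, PySem.List.pyGetD_natCast]
  cases rest with
  | nil => simp
  | cons r rs =>
    have h : pre ++ t :: r :: rs = (pre ++ [t]) ++ r :: rs := by simp
    rw [h]
    have hlen : pre.length + 1 = (pre ++ [t]).length := by simp
    rw [hlen]
    simp

theorem pvOptionValue_eq (pre : List String) (t : String) (rest : List String) :
    option_value (pre ++ t :: rest) (pre.length : Int) = pvOv t rest := by
  unfold option_value pvOv pvVal
  simp only [pvGetD_mid]
  by_cases h : PySem.Str.isIn "=" t = true
  · simp only [h, if_pos]
  · rw [if_neg h, if_neg h]
    have hlen : ((pre ++ t :: rest).length : Int) = (pre.length : Int) + 1 + rest.length := by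
      push_cast [List.length_append, List.length_cons]; ring
    cases rest with
    | nil => rw [if_neg (by rw [hlen]; simp)]; rfl
    | cons r rs =>
      have h2 : (0:Int) < ((r :: rs : List String).length : Int) := by
        exact_mod_cast Nat.succ_pos rs.length
      rw [if_pos (by rw [hlen]; omega)]
      exact pvGetD_mid_succ pre t (r :: rs)

-- A's fold over the enumerated suffix computes acc || pvAux suffix
theorem pvFoldA (suf : List String) : ∀ (pre : List String) (acc : Bool),
    (PySem.List.enumerate suf (pre.length : Int)).foldl
      (fun acc p =>
        acc || ((p.2 == "-serial" || PySem.Str.startswith p.2 "-serial=") &&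
                pvInSet (option_value (pre ++ suf) p.1)))
      acc = (acc || pvAux suf) := by
  induction suf with
  | nil => intro pre acc; simp [PySem.List.enumerate_nil, pvAux]
  | cons t rest ih =>
    intro pre acc
    rw [PySem.List.enumerate_cons, List.foldl_cons]
    have hcast : (pre.length : Int) + 1 = ((pre ++ [t]).length : Int) := by
      simp
    have hlist : pre ++ t :: rest = (pre ++ [t]) ++ rest := by simp
    rw [hcast, hlist, ih (pre ++ [t])]
    rw [show (pre ++ [t]) ++ rest = pre ++ t :: rest from by simp, pvOptionValue_eq]
    show ((acc || _) || pvAux rest) = (acc || pvAux (t :: rest))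
    rw [pvAux, Bool.or_assoc]

-- B's scan = pending's contribution at the head || "-nographic" present || pvAux
theorem pvScan_eq (toks : List String) : ∀ (pending : Bool),
    pvScan toks pending =
      ((pending && pvInSet (toks.headD "")) ||
       toks.contains "-nographic" || pvAux toks) := by
  induction toks with
  | nil =>
    intro pending
    have h0 : pvInSet "" = false := by decide
    simp [pvScan, pvAux, h0]
  | cons t rest ih =>
    intro pending
    show (if pending && pvInSet t then true
      else if t == "-nographic" then true
      else if PySem.Str.startswith t "-serial=" then
        if pvInSet (pvVal t) then true else pvScan rest false
      else pvScan rest (t == "-serial")) = _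
    simp only [List.headD_cons]
    by_cases hp : (pending && pvInSet t) = true
    · rw [if_pos hp, hp]
      simp
    · rw [if_neg (by simpa using hp)]
      rw [Bool.not_eq_true] at hp
      rw [hp]
      by_cases hn : t = "-nographic"
      · subst hn; simp
      · rw [if_neg (by simpa using hn)]
        have hn' : ¬"-nographic" = t := fun h => hn h.symm
        have hcont : (t :: rest).contains "-nographic" = rest.contains "-nographic" := by
          simp [hn']
        by_cases hs : PySem.Str.startswith t "-serial=" = true
        · have heq : (t == "-serial") = false := by
            have hne : t ≠ "-serial" := by
              intro h; subst h; revert hs; decide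
            simpa using hne
          have hin : PySem.Str.isIn "=" t = true := by
            have hpref : ("-serial=".toList) <+: t.toList :=
              (PySem.Chars.startswith_iff t.toList "-serial=".toList).mp (by simpa using hs)
            have hinf : ("=".toList) <:+: t.toList :=
              List.IsInfix.trans (by decide) hpref.isInfix
            simpa using (PySem.Chars.isIn_iff_infix "=".toList t.toList).mpr hinf
          rw [if_pos hs]
          have hauxt : pvAux (t :: rest) = (pvInSet (pvVal t) || pvAux rest) := by
            rw [pvAux, heq, hs, pvOv, if_pos hin]
            simp [pvVal]
          by_cases hv : pvInSet (pvVal t) = true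
          · rw [if_pos hv, hauxt, hv]
            simp
          · rw [Bool.not_eq_true] at hv
            rw [if_neg (by simp [hv]), ih false, hauxt, hv, hcont]
            simp
        · rw [if_neg hs, ih (t == "-serial")]
          rw [Bool.not_eq_true] at hs
          have hauxt : pvAux (t :: rest) =
              (((t == "-serial") && pvInSet (rest.headD "")) || pvAux rest) := by
            by_cases he : t = "-serial"
            · subst he
              rw [pvAux, pvOv, if_neg (by decide)]
              simp
            · have heb : (t == "-serial") = false := by simpa using he
              rw [pvAux, heb, hs]
              simp
          rw [hauxt, hcont]
          cases t == "-serial" <;> cases pvInSet (rest.headD "") <;> simp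

theorem pvMain_eq (command : List String) :
    has_serial_stdio command = has_serial_stdio_alt command := by
  unfold has_serial_stdio has_serial_stdio_alt
  rw [pvScan_eq]
  have hA := pvFoldA command [] false
  simp only [List.nil_append, List.length_nil, Nat.cast_zero, pvInSet] at hA
  rw [hA]
  cases command.contains "-nographic" <;> simp [pvInSet]

-- ===== VERDICT (by name: the statement is the Claim_ definition above) =====
theorem has_serial_stdio_spec : Claim_equal_has_serial_stdio := by
  intro command _
  show has_serial_stdio command = has_serial_stdio_alt command
  exact pvMain_eq command
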